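-- pv_equiv track=rewrite | github.com/jbellsolutions/swipe-library | scripts/verify_repo.py | classify_tracked
-- ===== SOURCE A (Python) =====
-- from collections import Counter
--
-- def classify_tracked(tracked: set[str]) -> dict[str, int]:
--     counts = Counter()
--     for path in tracked:
--         if path.startswith("data/raw/"):
--             counts["raw_files"] += 1
--         elif path.startswith("data/normalized/"):
--             counts["normalized_files"] += 1
--         elif path.startswith("scripts/"):
--             counts["script_files"] += 1
--         elif path.startswith("docs/"):
--             counts["doc_files"] += 1
--         elif path.startswith("config/"):
--             counts["config_files"] += 1
--         elif path.startswith("schemas/"):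
--             counts["schema_files"] += 1
--         else:
--             counts["top_level_files"] += 1
--     return dict(sorted(counts.items()))
-- ===== SOURCE B (Python) =====
-- def classify_tracked(tracked: set[str]) -> dict[str, int]:
--     # Staged counting: one independent counting pass per category (the six
--     # prefixes are pairwise disjoint, so first-match order is irrelevant),
--     # rows built directly in alphabetical output order, zero rows dropped.
--     cats = [
--         ("config_files", "config/"),
--         ("doc_files", "docs/"),
--         ("normalized_files", "data/normalized/"),
--         ("raw_files", "data/raw/"),
--         ("schema_files", "schemas/"),
--         ("script_files", "scripts/"),
--     ]
--     rows = [(name, sum(1 for path in tracked if path.startswith(prefix)))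
--             for name, prefix in cats]
--     matched = sum(n for _, n in rows)
--     rows.append(("top_level_files", len(tracked) - matched))
--     return {name: n for name, n in rows if n}
-- ===== Notes on version B (the rewrite author's own statement) =====
-- stated objective: alternative
-- what changed: Replaces A's single first-match if/elif pass that builds a Counter and sorts its items with staged per-category counting passes (the six prefixes are pairwise disjoint), assembling the rows directly in alphabetical output order, the default count obtained as len(tracked) minus the matched total, and zero rows filtered out; no Counter and no final sort.
import Mathlib
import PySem

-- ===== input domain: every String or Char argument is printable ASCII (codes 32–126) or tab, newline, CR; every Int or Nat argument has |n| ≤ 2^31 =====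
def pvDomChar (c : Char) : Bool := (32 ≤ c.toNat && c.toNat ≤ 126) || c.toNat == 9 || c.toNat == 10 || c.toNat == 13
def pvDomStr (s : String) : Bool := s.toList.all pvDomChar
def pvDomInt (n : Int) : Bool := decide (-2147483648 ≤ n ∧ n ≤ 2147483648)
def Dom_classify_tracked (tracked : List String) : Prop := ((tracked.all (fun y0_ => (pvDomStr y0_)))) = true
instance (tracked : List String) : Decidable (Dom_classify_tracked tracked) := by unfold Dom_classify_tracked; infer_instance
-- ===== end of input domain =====

-- B replaces A's first-match if/elif pass (Counter, then sort) by independent per-category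
-- counting passes over disjoint prefixes, building the rows directly in sorted output order.

-- ===== PORT A =====
def classify_tracked (tracked : List String) : List (String × Int) :=
  let counts : PySem.Dict String Int :=
    tracked.foldl (fun counts path =>
      if PySem.Str.startswith path "data/raw/" then counts.modify "raw_files" 0 (· + 1)
      else if PySem.Str.startswith path "data/normalized/" then counts.modify "normalized_files" 0 (· + 1)
      else if PySem.Str.startswith path "scripts/" then counts.modify "script_files" 0 (· + 1)
      else if PySem.Str.startswith path "docs/" then counts.modify "doc_files" 0 (· + 1)
      else if PySem.Str.startswith path "config/" then counts.modify "config_files" 0 (· + 1)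
      else if PySem.Str.startswith path "schemas/" then counts.modify "schema_files" 0 (· + 1)
      else counts.modify "top_level_files" 0 (· + 1)) PySem.Dict.empty
  PySem.List.sorted2 counts.items (fun p => p.1) (fun p => p.2)

-- ===== PORT B =====
-- the `cats` table of Source B: categories in alphabetical output order with their prefixes
def pvCats : List (String × String) :=
  [("config_files", "config/"),
   ("doc_files", "docs/"),
   ("normalized_files", "data/normalized/"),
   ("raw_files", "data/raw/"),
   ("schema_files", "schemas/"),
   ("script_files", "scripts/")]

def classify_tracked_alt (tracked : List String) : List (String × Int) :=
  -- rows = [(name, sum(1 for path in tracked if path.startswith(prefix))) for name, prefix in cats]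
  let rows : List (String × Int) :=
    pvCats.map (fun nc => (nc.1, ((tracked.countP (fun path => PySem.Str.startswith path nc.2)) : Int)))
  -- matched = sum(n for _, n in rows)
  let matched : Int := (rows.map (fun r => r.2)).sum
  -- rows.append(("top_level_files", len(tracked) - matched))
  let rows := rows ++ [("top_level_files", (tracked.length : Int) - matched)]
  -- {name: n for name, n in rows if n}  (names are distinct, so the dict is the filtered list)
  rows.filter (fun r => r.2 != 0)

-- ===== PRECONDITION & SPEC =====
def Spec_classify_tracked (tracked : List String) (out : List (String × Int)) : Prop := out = classify_tracked_alt tracked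
instance (tracked : List String) (out : List (String × Int)) : Decidable (Spec_classify_tracked tracked out) := by unfold Spec_classify_tracked; infer_instance

-- ===== CLAIM (what is proved, stated in full; the proofs are below) =====
def Claim_equal_classify_tracked : Prop := ∀ (tracked : List String), Dom_classify_tracked tracked → Spec_classify_tracked tracked (classify_tracked tracked)

-- ===== LEMMAS AND PROOFS =====

-- the category A's if/elif chain assigns to a path
def pvCat (p : String) : String :=
  if PySem.Str.startswith p "data/raw/" then "raw_files"
  else if PySem.Str.startswith p "data/normalized/" then "normalized_files"
  else if PySem.Str.startswith p "scripts/" then "script_files"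
  else if PySem.Str.startswith p "docs/" then "doc_files"
  else if PySem.Str.startswith p "config/" then "config_files"
  else if PySem.Str.startswith p "schemas/" then "schema_files"
  else "top_level_files"

def pvNames : List String :=
  ["config_files", "doc_files", "normalized_files", "raw_files", "schema_files", "script_files", "top_level_files"]

-- a path cannot start with two incomparable prefixes
theorem pv_not_both (p a b : String) (hab : ¬ a.toList <+: b.toList) (hba : ¬ b.toList <+: a.toList)
    (h1 : PySem.Str.startswith p a = true) (h2 : PySem.Str.startswith p b = true) : False := by
  simp only [PySem.Str.startswith, PySem.Chars.startswith_iff] at h1 h2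
  rcases List.prefix_or_prefix_of_prefix h1 h2 with h | h
  · exact hab h
  · exact hba h

theorem pv_iff_raw (p : String) : pvCat p = "raw_files" ↔ PySem.Str.startswith p "data/raw/" = true := by
  unfold pvCat
  split_ifs with h1 h2 h3 h4 h5 h6
  · exact iff_of_true rfl h1
  all_goals exact iff_of_false (by decide) h1

theorem pv_iff_norm (p : String) : pvCat p = "normalized_files" ↔ PySem.Str.startswith p "data/normalized/" = true := by
  unfold pvCat
  split_ifs with h1 h2 h3 h4 h5 h6
  · exact iff_of_false (by decide) (fun hs => pv_not_both p "data/raw/" "data/normalized/" (by decide) (by decide) h1 hs)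
  · exact iff_of_true rfl h2
  all_goals exact iff_of_false (by decide) h2

theorem pv_iff_script (p : String) : pvCat p = "script_files" ↔ PySem.Str.startswith p "scripts/" = true := by
  unfold pvCat
  split_ifs with h1 h2 h3 h4 h5 h6
  · exact iff_of_false (by decide) (fun hs => pv_not_both p "data/raw/" "scripts/" (by decide) (by decide) h1 hs)
  · exact iff_of_false (by decide) (fun hs => pv_not_both p "data/normalized/" "scripts/" (by decide) (by decide) h2 hs)
  · exact iff_of_true rfl h3
  all_goals exact iff_of_false (by decide) h3

theorem pv_iff_doc (p : String) : pvCat p = "doc_files" ↔ PySem.Str.startswith p "docs/" = true := by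
  unfold pvCat
  split_ifs with h1 h2 h3 h4 h5 h6
  · exact iff_of_false (by decide) (fun hs => pv_not_both p "data/raw/" "docs/" (by decide) (by decide) h1 hs)
  · exact iff_of_false (by decide) (fun hs => pv_not_both p "data/normalized/" "docs/" (by decide) (by decide) h2 hs)
  · exact iff_of_false (by decide) (fun hs => pv_not_both p "scripts/" "docs/" (by decide) (by decide) h3 hs)
  · exact iff_of_true rfl h4
  all_goals exact iff_of_false (by decide) h4

theorem pv_iff_config (p : String) : pvCat p = "config_files" ↔ PySem.Str.startswith p "config/" = true := by
  unfold pvCat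
  split_ifs with h1 h2 h3 h4 h5 h6
  · exact iff_of_false (by decide) (fun hs => pv_not_both p "data/raw/" "config/" (by decide) (by decide) h1 hs)
  · exact iff_of_false (by decide) (fun hs => pv_not_both p "data/normalized/" "config/" (by decide) (by decide) h2 hs)
  · exact iff_of_false (by decide) (fun hs => pv_not_both p "scripts/" "config/" (by decide) (by decide) h3 hs)
  · exact iff_of_false (by decide) (fun hs => pv_not_both p "docs/" "config/" (by decide) (by decide) h4 hs)
  · exact iff_of_true rfl h5
  all_goals exact iff_of_false (by decide) h5

theorem pv_iff_schema (p : String) : pvCat p = "schema_files" ↔ PySem.Str.startswith p "schemas/" = true := by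
  unfold pvCat
  split_ifs with h1 h2 h3 h4 h5 h6
  · exact iff_of_false (by decide) (fun hs => pv_not_both p "data/raw/" "schemas/" (by decide) (by decide) h1 hs)
  · exact iff_of_false (by decide) (fun hs => pv_not_both p "data/normalized/" "schemas/" (by decide) (by decide) h2 hs)
  · exact iff_of_false (by decide) (fun hs => pv_not_both p "scripts/" "schemas/" (by decide) (by decide) h3 hs)
  · exact iff_of_false (by decide) (fun hs => pv_not_both p "docs/" "schemas/" (by decide) (by decide) h4 hs)
  · exact iff_of_false (by decide) (fun hs => pv_not_both p "config/" "schemas/" (by decide) (by decide) h5 hs)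
  · exact iff_of_true rfl h6
  · exact iff_of_false (by decide) h6

theorem pvCat_mem (p : String) : pvCat p ∈ pvNames := by
  unfold pvCat pvNames; split_ifs <;> simp

-- count of a category in map pvCat = the per-prefix countP of B
theorem pv_count_eq (tracked : List String) (name pre : String)
    (hiff : ∀ p, pvCat p = name ↔ PySem.Str.startswith p pre = true) :
    List.count name (tracked.map pvCat) = tracked.countP (fun p => PySem.Str.startswith p pre) := by
  rw [List.count, List.countP_map]
  exact List.countP_congr (fun x _ => by
    simp only [Function.comp_apply, beq_iff_eq]
    simpa using hiff x)

-- the seven category counts sum to the length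
theorem pv_count_sum (ms : List String) (h : ∀ c ∈ ms, c ∈ pvNames) :
    List.count "config_files" ms + List.count "doc_files" ms + List.count "normalized_files" ms
      + List.count "raw_files" ms + List.count "schema_files" ms + List.count "script_files" ms
      + List.count "top_level_files" ms = ms.length := by
  induction ms with
  | nil => simp
  | cons x t ih =>
    have hx := h x (by simp)
    have ht := ih (fun c hc => h c (List.mem_cons_of_mem _ hc))
    simp only [pvNames, List.mem_cons, List.not_mem_nil, or_false] at hx
    rcases hx with rfl | rfl | rfl | rfl | rfl | rfl | rfl <;>
      simp <;> omega

theorem pvNames_pairwise : pvNames.Pairwise (fun a b => a < b) := by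
  have h : pvNames.Pairwise (fun a b => a.toList < b.toList) := by unfold pvNames; decide
  exact h.imp (fun h => String.lt_iff_toList_lt.2 h)

theorem pvNames_nodup : pvNames.Nodup :=
  pvNames_pairwise.imp (fun h => ne_of_lt h)

-- ===== the lexicographic order sorted2 uses =====
def pvR (a b : String × Int) : Prop := a.1 < b.1 ∨ (a.1 = b.1 ∧ a.2 ≤ b.2)

def pvLt2 (a b : String × Int) : Bool :=
  decide (a.1 < b.1) || (!decide (b.1 < a.1) && decide (a.2 < b.2))

theorem pvR_of_lt2_true {a b : String × Int} (h : pvLt2 a b = true) : pvR a b := by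
  unfold pvLt2 at h
  rcases Bool.or_eq_true_iff.1 h with h' | h'
  · exact Or.inl (of_decide_eq_true h')
  · rcases Bool.and_eq_true_iff.1 h' with ⟨h1, h2⟩
    have h1' : ¬ b.1 < a.1 := of_decide_eq_true (by simpa using h1)
    rcases lt_or_ge a.1 b.1 with hl | hg
    · exact Or.inl hl
    · exact Or.inr ⟨le_antisymm (le_of_not_gt h1') hg, le_of_lt (of_decide_eq_true h2)⟩

theorem pvR_of_lt2_false {a b : String × Int} (h : pvLt2 a b = false) : pvR b a := by
  unfold pvLt2 at h
  rcases Bool.or_eq_false_iff.1 h with ⟨h1, h2⟩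
  have h1' : ¬ a.1 < b.1 := of_decide_eq_false h1
  rcases Bool.and_eq_false_iff.1 h2 with h3 | h3
  · have : b.1 < a.1 := of_decide_eq_true (by simpa using h3)
    exact Or.inl this
  · rcases lt_or_ge b.1 a.1 with hl | hg
    · exact Or.inl hl
    · exact Or.inr ⟨le_antisymm (le_of_not_gt h1') hg, le_of_not_gt (of_decide_eq_false h3)⟩

theorem pvR_trans {a b c : String × Int} (h1 : pvR a b) (h2 : pvR b c) : pvR a c := by
  rcases h1 with h1 | ⟨h1, h1'⟩ <;> rcases h2 with h2 | ⟨h2, h2'⟩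
  · exact Or.inl (lt_trans h1 h2)
  · exact Or.inl (h2 ▸ h1)
  · exact Or.inl (h1 ▸ h2)
  · exact Or.inr ⟨h1.trans h2, le_trans h1' h2'⟩

theorem pvR_antisymm {a b : String × Int} (h1 : pvR a b) (h2 : pvR b a) : a = b := by
  rcases h1 with h1 | ⟨h1, h1'⟩ <;> rcases h2 with h2 | ⟨h2, h2'⟩
  · exact absurd (lt_trans h1 h2) (lt_irrefl _)
  · exact absurd h1 (h2 ▸ lt_irrefl _)
  · exact absurd h2 (h1 ▸ lt_irrefl _)
  · exact Prod.ext h1 (le_antisymm h1' h2')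

theorem pv_insertBy_pairwise (x : String × Int) (ys : List (String × Int)) (h : ys.Pairwise pvR) :
    (PySem.List.insertBy pvLt2 x ys).Pairwise pvR := by
  induction ys with
  | nil => simp [PySem.List.insertBy]
  | cons y t ih =>
    have hcons : PySem.List.insertBy pvLt2 x (y :: t)
        = if pvLt2 x y then x :: y :: t else y :: PySem.List.insertBy pvLt2 x t := rfl
    rw [hcons]
    rcases List.pairwise_cons.1 h with ⟨hy, ht⟩
    by_cases hb : pvLt2 x y = true
    · rw [if_pos hb]
      refine List.pairwise_cons.2 ⟨?_, h⟩
      intro z hz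
      rcases List.mem_cons.1 hz with rfl | hz
      · exact pvR_of_lt2_true hb
      · exact pvR_trans (pvR_of_lt2_true hb) (hy z hz)
    · rw [if_neg hb]
      refine List.pairwise_cons.2 ⟨?_, ih ht⟩
      intro z hz
      rcases (PySem.List.mem_insertBy _ _ _ _).1 hz with rfl | hz
      · exact pvR_of_lt2_false (Bool.eq_false_iff.2 hb)
      · exact hy z hz

theorem pv_sorted2_pairwise (xs : List (String × Int)) :
    (PySem.List.sorted2 xs (fun p => p.1) (fun p => p.2)).Pairwise pvR := by
  unfold PySem.List.sorted2
  simp only [if_neg (by decide : ¬ (false = true))]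
  suffices h : ∀ acc : List (String × Int), acc.Pairwise pvR →
      (xs.foldl (fun acc x => PySem.List.insertBy pvLt2 x acc) acc).Pairwise pvR by
    exact h [] (by simp)
  induction xs with
  | nil => exact fun acc hacc => hacc
  | cons x t ih => exact fun acc hacc => ih _ (pv_insertBy_pairwise x acc hacc)

-- any strictly key-increasing rearrangement IS sorted2
theorem pv_sorted2_eq (xs ys : List (String × Int)) (hperm : ys.Perm xs)
    (hpw : ys.Pairwise (fun a b => a.1 < b.1)) :
    PySem.List.sorted2 xs (fun p => p.1) (fun p => p.2) = ys := by
  refine List.eq_of_perm_of_sorted (le := pvR) (fun a b _ _ => pvR_antisymm)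
    (pv_sorted2_pairwise xs) (hpw.imp (fun h => Or.inl h))
    ((PySem.List.sorted2_perm xs _ _ _).trans hperm.symm)

-- A computes sorted2 of the items of Counter(map pvCat tracked)
theorem pvA_eq (tracked : List String) :
    classify_tracked tracked
      = PySem.List.sorted2 (PySem.Dict.counter (tracked.map pvCat)).items (fun p => p.1) (fun p => p.2) := by
  simp only [classify_tracked]
  rw [PySem.Dict.counter_eq_foldl, List.foldl_map]
  refine congrArg (fun d : PySem.Dict String Int => PySem.List.sorted2 d.items (fun p => p.1) (fun p => p.2)) ?_
  refine PySem.List.foldl_congr_mem tracked _ _ PySem.Dict.empty (fun d p _ => ?_)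
  unfold pvCat
  split_ifs <;> rfl

-- B computes the alphabetical nonzero rows of the same counts
theorem pvB_eq (tracked : List String) :
    classify_tracked_alt tracked
      = ((pvNames.map (fun c => (c, (List.count c (tracked.map pvCat) : Int)))).filter
          (fun r => r.2 != 0)) := by
  have e1 := pv_count_eq tracked "config_files" "config/" pv_iff_config
  have e2 := pv_count_eq tracked "doc_files" "docs/" pv_iff_doc
  have e3 := pv_count_eq tracked "normalized_files" "data/normalized/" pv_iff_norm
  have e4 := pv_count_eq tracked "raw_files" "data/raw/" pv_iff_raw
  have e5 := pv_count_eq tracked "schema_files" "schemas/" pv_iff_schema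
  have e6 := pv_count_eq tracked "script_files" "scripts/" pv_iff_script
  have hsum := pv_count_sum (tracked.map pvCat) (fun c hc => by
    rcases List.mem_map.1 hc with ⟨p, _, rfl⟩; exact pvCat_mem p)
  have hlen : (tracked.map pvCat).length = tracked.length := List.length_map ..
  have e7 : (tracked.length : Int)
      - ((List.count "config_files" (tracked.map pvCat) : Int)
        + ((List.count "doc_files" (tracked.map pvCat) : Int)
        + ((List.count "normalized_files" (tracked.map pvCat) : Int)
        + ((List.count "raw_files" (tracked.map pvCat) : Int)
        + ((List.count "schema_files" (tracked.map pvCat) : Int)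
        + ((List.count "script_files" (tracked.map pvCat) : Int) + 0))))))
      = (List.count "top_level_files" (tracked.map pvCat) : Int) := by
    rw [← hlen]
    push_cast [← hsum]
    ring
  unfold classify_tracked_alt
  simp only [pvCats, List.map_cons, List.map_nil, List.sum_cons, List.sum_nil]
  rw [← e1, ← e2, ← e3, ← e4, ← e5, ← e6, e7]
  congr 1

-- ===== VERDICT (by name: the statement is the Claim_ definition above) =====
theorem classify_tracked_spec : Claim_equal_classify_tracked := by
  intro tracked _
  unfold Spec_classify_tracked
  rw [pvA_eq, pvB_eq]
  refine pv_sorted2_eq _ _ ?_ ?_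
  · -- permutation with the counter's items
    rw [PySem.Dict.items_counter, List.filter_map]
    refine List.Perm.map _ ?_
    refine (List.perm_ext_iff_of_nodup (List.Nodup.filter _ pvNames_nodup)
      (PySem.Set.nodup_ofList (tracked.map pvCat))).2 ?_
    intro c
    simp only [List.mem_filter, PySem.Set.mem_ofList, Function.comp_apply, bne_iff_ne, ne_eq]
    constructor
    · rintro ⟨-, hc⟩
      have : List.count c (tracked.map pvCat) ≠ 0 := by
        intro h0; exact hc (by simp [h0])
      exact List.count_pos_iff.1 (Nat.pos_of_ne_zero this)
    · intro hc
      refine ⟨?_, ?_⟩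
      · rcases List.mem_map.1 hc with ⟨p, -, rfl⟩; exact pvCat_mem p
      · have : 0 < List.count c (tracked.map pvCat) := List.count_pos_iff.2 hc
        simp only [← ne_eq]
        exact_mod_cast Nat.pos_iff_ne_zero.1 this
  · -- strictly increasing names
    refine List.Pairwise.filter _ ?_
    rw [List.pairwise_map]
    exact pvNames_pairwise
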